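-- pv_equiv track=rewrite | github.com/Yan-1999/SoftwareTesting | 8calendar/calend.py | getTotalDays
-- ===== SOURCE A (Python) =====
-- def leap_year(year):
--     if year % 4 == 0 and year % 100 != 0 or year % 400 == 0:
--         return True
--     else:
--         return False
--
-- def getMonthDays(year, month):
--     days = 31
--     if month == 2:  # 确定2月天数
--         if leap_year(year):
--             days = 29
--         else:
--             days = 28
--     elif month == 4 or month == 6 or month == 9 or month == 11:  # 4 6 9 11这些月份均为30天
--         days = 30
--     return days
--
-- def getTotalDays(start_year, year, month):
--     totalDays = 0
--     for i in range(start_year, year):  # 计算从第一年到查询年份的前一年的总天数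
--         if leap_year(i):
--             totalDays += 366
--         else:
--             totalDays += 365
--     for i in range(1, month):  # 再计算查询年份从一月到查询月份的前一个月的天数相加，得到总天数
--         totalDays += getMonthDays(year, i)
--
--     return totalDays
-- ===== SOURCE B (Python) =====
-- def getTotalDays(start_year, year, month):
--     # closed-form leap count: leaps in (0, n] counted with floor division
--     def L(n):
--         return n // 4 - n // 100 + n // 400
--
--     total = 0
--     if start_year < year:
--         total += 365 * (year - start_year) + L(year - 1) - L(start_year - 1)
--     if month > 1:
--         m = month - 1  # number of full months summed
--         total += 31 * m
--         # February deficit (31 - 28/29)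
--         if m >= 2:
--             total -= 2 if (year % 4 == 0 and year % 100 != 0 or year % 400 == 0) else 3
--         # 30-day months: 4, 6, 9, 11
--         total -= sum(1 for d in (4, 6, 9, 11) if d <= m)
--     return total
-- ===== Notes on version B (the rewrite author's own statement) =====
-- stated objective: faster
-- what changed: Replaces the per-year loop and per-month loop by a closed-form count: leap years via floor-division inclusion-exclusion (n//4 - n//100 + n//400) and month days via 31*(month-1) minus February and 30-day-month corrections.
import Mathlib
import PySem

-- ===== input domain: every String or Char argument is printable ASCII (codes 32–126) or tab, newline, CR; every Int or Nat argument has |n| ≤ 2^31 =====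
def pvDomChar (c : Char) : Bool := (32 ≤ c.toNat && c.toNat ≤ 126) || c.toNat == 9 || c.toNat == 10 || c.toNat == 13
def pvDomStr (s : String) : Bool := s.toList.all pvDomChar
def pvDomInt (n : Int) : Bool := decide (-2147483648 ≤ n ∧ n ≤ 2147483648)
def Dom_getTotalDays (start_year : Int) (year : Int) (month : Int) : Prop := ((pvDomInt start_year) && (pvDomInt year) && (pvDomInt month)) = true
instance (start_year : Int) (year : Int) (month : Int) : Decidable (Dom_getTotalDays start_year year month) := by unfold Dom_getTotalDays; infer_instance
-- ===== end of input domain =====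

-- B replaces both loops of A with closed-form arithmetic (floor-division leap count); objective: faster (asymptotic).

-- ===== PORT A =====
def leapYear (year : Int) : Bool :=
  if (PySem.Int.mod year 4 == 0 && PySem.Int.mod year 100 != 0) || PySem.Int.mod year 400 == 0 then
    true
  else
    false

def getMonthDays (year : Int) (month : Int) : Int :=
  let days : Int := 31
  if month == 2 then
    if leapYear year then 29 else 28
  else if month == 4 || month == 6 || month == 9 || month == 11 then
    30
  else
    days

def getTotalDays (start_year : Int) (year : Int) (month : Int) : Int :=
  let totalDays : Int := 0
  let totalDays := (PySem.List.pyRange start_year year 1).foldl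
    (fun acc i => if leapYear i then acc + 366 else acc + 365) totalDays
  let totalDays := (PySem.List.pyRange 1 month 1).foldl
    (fun acc i => acc + getMonthDays year i) totalDays
  totalDays

-- ===== PORT B =====
def altL (n : Int) : Int :=
  PySem.Int.floordiv n 4 - PySem.Int.floordiv n 100 + PySem.Int.floordiv n 400

def getTotalDays_alt (start_year : Int) (year : Int) (month : Int) : Int :=
  let total : Int := 0
  let total := if start_year < year then
      total + 365 * (year - start_year) + altL (year - 1) - altL (start_year - 1)
    else total
  if 1 < month then
    let m := month - 1
    let total := total + 31 * m
    let total := if 2 ≤ m then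
        total - (if (PySem.Int.mod year 4 == 0 && PySem.Int.mod year 100 != 0)
                    || PySem.Int.mod year 400 == 0 then 2 else 3)
      else total
    total - (([4, 6, 9, 11] : List Int).map (fun d => if d ≤ m then (1 : Int) else 0)).sum
  else total

-- ===== PRECONDITION & SPEC =====
def Spec_getTotalDays (start_year : Int) (year : Int) (month : Int) (out : Int) : Prop := out = getTotalDays_alt start_year year month
instance (start_year : Int) (year : Int) (month : Int) (out : Int) : Decidable (Spec_getTotalDays start_year year month out) := by unfold Spec_getTotalDays; infer_instance

-- ===== CLAIM (what is proved, stated in full; the proofs are below) =====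
def Claim_equal_getTotalDays : Prop := ∀ (start_year : Int) (year : Int) (month : Int), Dom_getTotalDays start_year year month → Spec_getTotalDays start_year year month (getTotalDays start_year year month)

-- ===== LEMMAS AND PROOFS =====

theorem leapYear_eq (n : Int) :
    leapYear n = ((PySem.Int.mod n 4 == 0 && PySem.Int.mod n 100 != 0)
      || PySem.Int.mod n 400 == 0) := by
  unfold leapYear
  split_ifs with h
  · exact h.symm
  · exact ((Bool.not_eq_true _).mp h).symm

theorem leapYear_iff (n : Int) :
    leapYear n = true ↔ ((n % 4 = 0 ∧ ¬ n % 100 = 0) ∨ n % 400 = 0) := by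
  rw [leapYear_eq,
      PySem.Int.mod_eq_emod_of_pos (a := n) (b := 4) (by norm_num),
      PySem.Int.mod_eq_emod_of_pos (a := n) (b := 100) (by norm_num),
      PySem.Int.mod_eq_emod_of_pos (a := n) (b := 400) (by norm_num)]
  simp only [Bool.or_eq_true, Bool.and_eq_true, beq_iff_eq, bne_iff_ne, ne_eq]

-- step identity for the closed-form leap count
theorem altL_step (n : Int) :
    altL n - altL (n - 1) = (if leapYear n then (1 : Int) else 0) := by
  unfold altL
  rw [PySem.Int.floordiv_eq_ediv_of_pos (by norm_num),
      PySem.Int.floordiv_eq_ediv_of_pos (by norm_num),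
      PySem.Int.floordiv_eq_ediv_of_pos (by norm_num),
      PySem.Int.floordiv_eq_ediv_of_pos (by norm_num),
      PySem.Int.floordiv_eq_ediv_of_pos (by norm_num),
      PySem.Int.floordiv_eq_ediv_of_pos (by norm_num)]
  by_cases hc : leapYear n = true
  · rw [if_pos hc]
    rw [leapYear_iff] at hc
    omega
  · rw [if_neg hc]
    rw [leapYear_iff] at hc
    push_neg at hc
    omega

-- the year loop of A in closed form
theorem yearLoop_closed (s : Int) (n : Nat) (acc : Int) :
    (PySem.List.pyRange s (s + n) 1).foldl
      (fun acc i => if leapYear i then acc + 366 else acc + 365) acc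
      = acc + 365 * n + altL (s + n - 1) - altL (s - 1) := by
  induction n generalizing acc with
  | zero => simp [PySem.List.pyRange_one]
  | succ k ih =>
      have h : (PySem.List.pyRange s (s + (k + 1 : Nat)) 1)
          = PySem.List.pyRange s (s + k) 1 ++ [s + k] := by
        have := PySem.List.pyRange_one_succ_right (a := s) (b := s + k) (by omega)
        simpa [add_assoc] using this
      rw [h, List.foldl_append, ih, List.foldl_cons, List.foldl_nil]
      have hstep := altL_step (s + k)
      rw [show (s + ((k + 1 : Nat) : Int) - 1) = s + k from by push_cast; ring]
      push_cast
      split_ifs at hstep ⊢ <;> omega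

-- the month loop of A equals B's month correction term, for month = 1 + n
set_option maxHeartbeats 1000000 in
theorem monthLoop_closed (y : Int) (n : Nat) (acc : Int) :
    (PySem.List.pyRange 1 (1 + n) 1).foldl (fun acc i => acc + getMonthDays y i) acc
      = acc + 31 * n
        - (if 2 ≤ (n : Int) then (if leapYear y then (2 : Int) else 3) else 0)
        - (([4, 6, 9, 11] : List Int).map (fun d => if d ≤ (n : Int) then (1 : Int) else 0)).sum := by
  induction n generalizing acc with
  | zero => simp [PySem.List.pyRange_one]
  | succ k ih =>
      have h : (PySem.List.pyRange 1 (1 + (k + 1 : Nat)) 1)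
          = PySem.List.pyRange 1 (1 + k) 1 ++ [1 + (k : Int)] := by
        have := PySem.List.pyRange_one_succ_right (a := 1) (b := 1 + (k : Int)) (by omega)
        simpa [add_assoc] using this
      rw [h, List.foldl_append, ih, List.foldl_cons, List.foldl_nil]
      rcases Nat.lt_or_ge k 12 with hk | hk
      · interval_cases k <;> simp only [getMonthDays, List.map, List.sum_cons, List.sum_nil] <;>
          norm_num <;> split_ifs <;> omega
      · have h2 : getMonthDays y (1 + (k : Int)) = 31 := by
          have h1 : ((1 + (k : Int)) == 2) = false := by
            simp only [beq_eq_false_iff_ne, ne_eq]; omega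
          have h3 : ((1 + (k : Int)) == 4 || (1 + (k : Int)) == 6 || (1 + (k : Int)) == 9
              || (1 + (k : Int)) == 11) = false := by
            simp only [Bool.or_eq_false_iff, beq_eq_false_iff_ne, ne_eq]
            omega
          simp only [getMonthDays, h1, h3, Bool.false_eq_true, if_false]
        rw [h2]
        push_cast
        simp only [List.map, List.sum_cons, List.sum_nil]
        split_ifs <;> omega

-- ===== VERDICT (by name: the statement is the Claim_ definition above) =====
theorem getTotalDays_spec : Claim_equal_getTotalDays := by
  intro s y m _
  unfold Spec_getTotalDays
  simp only [getTotalDays, getTotalDays_alt]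
  rw [← leapYear_eq y]
  have hyear : (PySem.List.pyRange s y 1).foldl
      (fun acc i => if leapYear i then acc + 366 else acc + 365) 0
      = (if s < y then 0 + 365 * (y - s) + altL (y - 1) - altL (s - 1) else 0) := by
    rcases Int.lt_or_le s y with h | h
    · have h0 := yearLoop_closed s (y - s).toNat 0
      rw [show (s + (((y - s).toNat : Nat) : Int)) = y from by omega] at h0
      rw [show ((((y - s).toNat : Nat)) : Int) = y - s from by omega] at h0
      rw [if_pos h, h0]
    · rw [if_neg (by omega)]
      have he : PySem.List.pyRange s y 1 = [] := by
        rw [PySem.List.pyRange_one]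
        simp
        omega
      simp [he]
  rw [hyear]
  rcases Int.lt_or_le 1 m with hm | hm
  · rw [if_pos hm]
    have h0 := monthLoop_closed y (m - 1).toNat
      (if s < y then 0 + 365 * (y - s) + altL (y - 1) - altL (s - 1) else 0)
    rw [show ((1 : Int) + (((m - 1).toNat : Nat) : Int)) = m from by omega] at h0
    rw [show ((((m - 1).toNat : Nat)) : Int) = m - 1 from by omega] at h0
    rw [h0]
    split_ifs <;> ring
  · rw [if_neg (show ¬ (1 : Int) < m from by omega)]
    have he : PySem.List.pyRange 1 m 1 = [] := by
      rw [PySem.List.pyRange_one]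
      simp
      omega
    rw [he, List.foldl_nil]
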